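-- pv_equiv track=rewrite | github.com/badgerdoc/badgerdoc | table_extractor/inference_table_service/constuct_table_from_inference.py | _find_gaps_in_zone
-- ===== SOURCE A (Python) =====
-- from typing import Dict, List, Optional, Tuple, Union
--
-- def _find_gaps_in_zone(
--     line: List[bool], zone: Tuple[int, int]
-- ) -> List[List[int]]:
--     gaps = []
--     curr_gap = []
--     for point_idx in range(zone[0], zone[1]):
--         if line[point_idx] and curr_gap:
--             curr_gap.append(point_idx - 1)
--             gaps.append(curr_gap)
--             curr_gap = []
--         if not line[point_idx] and not curr_gap:
--             curr_gap.append(point_idx)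
--     if curr_gap:
--         curr_gap.append(zone[1])
--         gaps.append(curr_gap)
--     return gaps
-- ===== SOURCE B (Python) =====
-- from typing import List, Tuple
--
--
-- def _find_gaps_in_zone(
--     line: List[bool], zone: Tuple[int, int]
-- ) -> List[List[int]]:
--     gaps = []
--     i, end = zone[0], zone[1]
--     while i < end:
--         if line[i]:
--             i += 1
--             continue
--         j = i + 1
--         while j < end and not line[j]:
--             j += 1
--         if j == end:
--             gaps.append([i, end])
--         else:
--             gaps.append([i, j - 1])
--         i = j + 1
--     return gaps
-- ===== Notes on version B (the rewrite author's own statement) =====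
-- stated objective: alternative
-- what changed: Replaces A's flag-based accumulator (curr_gap list carried across every index, flushed on True) with a two-pointer run scanner that skips True indices and, on a False index, scans the whole False run at once and emits its bounds directly.
-- outside the precondition, e.g. on _find_gaps_in_zone([True], (0, 3)): A raises IndexError, B raises IndexError
import Mathlib
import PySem

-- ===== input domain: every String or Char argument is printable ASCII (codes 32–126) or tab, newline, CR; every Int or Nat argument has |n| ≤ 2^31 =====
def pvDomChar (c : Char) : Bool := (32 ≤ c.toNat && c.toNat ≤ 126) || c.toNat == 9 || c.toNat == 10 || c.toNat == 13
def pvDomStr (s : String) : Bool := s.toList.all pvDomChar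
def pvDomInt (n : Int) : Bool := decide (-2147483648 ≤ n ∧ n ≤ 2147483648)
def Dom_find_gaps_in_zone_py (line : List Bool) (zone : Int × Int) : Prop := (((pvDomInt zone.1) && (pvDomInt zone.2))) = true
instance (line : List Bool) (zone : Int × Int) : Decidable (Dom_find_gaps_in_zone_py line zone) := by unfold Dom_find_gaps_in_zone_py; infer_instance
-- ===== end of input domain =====

-- ===== PORT A =====
-- B replaces A's flag/accumulator single pass by a two-pointer run scanner; return values agree on Pre_ (where A does not raise IndexError).
-- A's loop body over state (gaps, curr_gap); both ifs in source order.
-- line[point_idx] is ported as pyGetD (its default is never reached under Pre_, which is exactly index validity for every accessed index).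
def fgzA_step (line : List Bool) (st : List (List Int) × List Int) (i : Int) :
    List (List Int) × List Int :=
  let v := PySem.List.pyGetD line i false
  let st1 := if v && !st.2.isEmpty then (st.1 ++ [st.2 ++ [i - 1]], ([] : List Int)) else st
  if !v && st1.2.isEmpty then (st1.1, st1.2 ++ [i]) else st1

def find_gaps_in_zone_py (line : List Bool) (zone : Int × Int) : List (List Int) :=
  let st := (PySem.List.pyRange zone.1 zone.2 1).foldl (fgzA_step line) ([], [])
  if st.2.isEmpty then st.1 else st.1 ++ [st.2 ++ [zone.2]]

-- ===== PORT B =====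
-- Source B's two while loops as two mutually recursive functions; the Nat argument is the
-- exact remaining count of indices below e (so 'fuel 0' is the loop test 'i < end' failing).
mutual
-- outer while: i is outside any gap
def fgzB_out (line : List Bool) (e : Int) : Nat → Int → List (List Int)
  | 0, _ => []
  | Nat.succ n, i =>
    if PySem.List.pyGetD line i false then fgzB_out line e n (i + 1)
    else fgzB_gap line e n (i + 1) i
-- inner while: scanning the False run that started at s; j is the next index to test
def fgzB_gap (line : List Bool) (e : Int) : Nat → Int → Int → List (List Int)
  | 0, _, s => [[s, e]]
  | Nat.succ n, j, s =>
    if PySem.List.pyGetD line j false then [s, j - 1] :: fgzB_out line e n (j + 1)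
    else fgzB_gap line e n (j + 1) s
end

def find_gaps_in_zone_py_alt (line : List Bool) (zone : Int × Int) : List (List Int) :=
  fgzB_out line zone.2 (zone.2 - zone.1).toNat zone.1

-- ===== PRECONDITION & SPEC =====
-- Pre_ excludes exactly the inputs where A raises IndexError: a nonempty zone whose
-- contiguous index range leaves the valid Python index range [-len, len).
def Pre_find_gaps_in_zone_py (line : List Bool) (zone : Int × Int) : Prop :=
  zone.1 < zone.2 → (-(line.length : Int) ≤ zone.1 ∧ zone.2 ≤ (line.length : Int))
instance (line : List Bool) (zone : Int × Int) : Decidable (Pre_find_gaps_in_zone_py line zone) := by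
  unfold Pre_find_gaps_in_zone_py; infer_instance

def pvWitness_find_gaps_in_zone_py : List Bool × (Int × Int) :=
  ([true, false, false, true, false], (0, 5))

def Spec_find_gaps_in_zone_py (line : List Bool) (zone : Int × Int) (out : List (List Int)) : Prop := out = find_gaps_in_zone_py_alt line zone
instance (line : List Bool) (zone : Int × Int) (out : List (List Int)) : Decidable (Spec_find_gaps_in_zone_py line zone out) := by unfold Spec_find_gaps_in_zone_py; infer_instance

-- ===== CLAIM (what is proved, stated in full; the proofs are below) =====
def Claim_equal_find_gaps_in_zone_py : Prop := ∀ (line : List Bool) (zone : Int × Int), Dom_find_gaps_in_zone_py line zone → Pre_find_gaps_in_zone_py line zone → Spec_find_gaps_in_zone_py line zone (find_gaps_in_zone_py line zone)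

-- ===== LEMMAS AND PROOFS =====

-- "fgzA_from i st": the rest of A starting at index i with state st, including the trailing flush.
def fgzA_from (line : List Bool) (e : Int) (i : Int) (st : List (List Int) × List Int) :
    List (List Int) :=
  let st' := (PySem.List.pyRange i e 1).foldl (fgzA_step line) st
  if st'.2.isEmpty then st'.1 else st'.1 ++ [st'.2 ++ [e]]

theorem fgzA_from_cons (line : List Bool) (e i : Int) (st : List (List Int) × List Int)
    (h : i < e) :
    fgzA_from line e i st = fgzA_from line e (i + 1) (fgzA_step line st i) := by
  unfold fgzA_from
  rw [PySem.List.pyRange_one_cons h, List.foldl_cons]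

theorem fgzA_from_nil (line : List Bool) (e i : Int) (st : List (List Int) × List Int)
    (h : e ≤ i) :
    fgzA_from line e i st = if st.2.isEmpty then st.1 else st.1 ++ [st.2 ++ [e]] := by
  unfold fgzA_from
  rw [PySem.List.pyRange_one_eq_nil h, List.foldl_nil]

-- Main invariant, by induction on the exact remaining count n = (e - i).toNat:
-- empty accumulator matches B's outer loop; an open gap [s] matches B's run scan.
theorem fgz_main (line : List Bool) (e : Int) (n : Nat) :
    ∀ i : Int, (e - i).toNat = n → i ≤ e →
      (∀ gaps : List (List Int),
        fgzA_from line e i (gaps, []) = gaps ++ fgzB_out line e n i) ∧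
      (∀ (gaps : List (List Int)) (s : Int),
        fgzA_from line e i (gaps, [s]) = gaps ++ fgzB_gap line e n i s) := by
  induction n with
  | zero =>
    intro i hn hle
    have he : e ≤ i := by omega
    refine ⟨fun gaps => ?_, fun gaps s => ?_⟩
    · rw [fgzA_from_nil line e i _ he]; simp [fgzB_out]
    · rw [fgzA_from_nil line e i _ he]; simp [fgzB_gap]
  | succ n ih =>
    intro i hn hle
    have hlt : i < e := by omega
    have ih' := ih (i + 1) (by omega) (by omega)
    by_cases hv : PySem.List.pyGetD line i false
    · refine ⟨fun gaps => ?_, fun gaps s => ?_⟩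
      · rw [fgzA_from_cons line e i _ hlt]
        have hstep : fgzA_step line (gaps, []) i = (gaps, []) := by
          simp [fgzA_step, hv]
        rw [hstep, (ih'.1) gaps, fgzB_out]
        rw [if_pos hv]
      · rw [fgzA_from_cons line e i _ hlt]
        have hstep : fgzA_step line (gaps, [s]) i = (gaps ++ [[s, i - 1]], []) := by
          simp [fgzA_step, hv]
        rw [hstep, (ih'.1) (gaps ++ [[s, i - 1]]), fgzB_gap]
        rw [if_pos hv, List.append_assoc]
        rfl
    · refine ⟨fun gaps => ?_, fun gaps s => ?_⟩
      · rw [fgzA_from_cons line e i _ hlt]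
        have hstep : fgzA_step line (gaps, []) i = (gaps, [i]) := by
          simp [fgzA_step, hv]
        rw [hstep, (ih'.2) gaps i, fgzB_out]
        rw [if_neg hv]
      · rw [fgzA_from_cons line e i _ hlt]
        have hstep : fgzA_step line (gaps, [s]) i = (gaps, [s]) := by
          simp [fgzA_step, hv]
        rw [hstep, (ih'.2) gaps s, fgzB_gap]
        rw [if_neg hv]

-- ===== VERDICT (by name: the statement is the Claim_ definition above) =====
theorem find_gaps_in_zone_py_spec : Claim_equal_find_gaps_in_zone_py := by
  intro line zone _ _
  unfold Spec_find_gaps_in_zone_py find_gaps_in_zone_py find_gaps_in_zone_py_alt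
  by_cases h : zone.1 ≤ zone.2
  · have := (fgz_main line zone.2 (zone.2 - zone.1).toNat zone.1 rfl h).1 []
    unfold fgzA_from at this
    simpa using this
  · have h0 : (zone.2 - zone.1).toNat = 0 := by omega
    rw [h0, PySem.List.pyRange_one_eq_nil (by omega : zone.2 ≤ zone.1)]
    simp [fgzB_out]
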